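-- pv_equiv track=rewrite | github.com/antmicro/rowhammer-tester | rowhammer_tester/scripts/read_level.py | read_level_find_best
-- ===== SOURCE A (Python) =====
-- def read_level_find_best(scores):
--     bs_windows = {}
--     for bs, dly_scores in scores.items():
--         # find read windows
--         windows = []
--         window_start = None
--         in_window = False
--         for dly, errors in dly_scores.items():
--             if errors == 0 and not in_window:
--                 window_start = dly
--                 in_window = True
--             elif in_window and errors != 0:
--                 windows.append((window_start, dly))
--                 in_window = False
--         if in_window:
--             windows.append((window_start, dly))
--
--         # find longest window
--         best_window = None
--         if len(windows):
--             best_window = max(windows, key=lambda win_range: win_range[1] - win_range[0])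
--         bs_windows[bs] = best_window
--
--     def cmp_bs_windows(bs):
--         if bs_windows[bs] is None:
--             return -1
--         length = bs_windows[bs][1] - bs_windows[bs][0]
--         return length
--
--     best_bs = max(bs_windows, key=cmp_bs_windows)
--     if bs_windows[best_bs] is None:
--         return None
--
--     # best delay is in the middle of the window
--     best_delay = (bs_windows[best_bs][0] + bs_windows[best_bs][1]) // 2
--     best_length = bs_windows[best_bs][1] - bs_windows[best_bs][0]
--     return best_bs, best_delay, best_length
-- ===== SOURCE B (Python) =====
-- def read_level_find_best(scores):
--     # Single fused pass: no intermediate windows list, no bs_windows dict,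
--     # no max() calls -- a running best per byte-slice and a global running best.
--     best = None  # (key, bs, best_window) with key = -1 for no window, else length
--     for bs, dly_scores in scores.items():
--         bw = None       # best (start, end) window for this bs so far
--         start = None    # start of the currently open zero-error run
--         end = 0         # last zero-error delay seen in the open run
--         for dly, errors in dly_scores.items():
--             if errors == 0:
--                 if start is None:
--                     start = dly
--                 end = dly
--             elif start is not None:
--                 if bw is None or dly - start > bw[1] - bw[0]:
--                     bw = (start, dly)
--                 start = None
--         if start is not None and (bw is None or end - start > bw[1] - bw[0]):
--             bw = (start, end)
--         key = -1 if bw is None else bw[1] - bw[0]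
--         if best is None or key > best[0]:
--             best = (key, bs, bw)
--     if best is None or best[2] is None:
--         return None
--     _, bs, (s, e) = best
--     return bs, (s + e) // 2, e - s
-- ===== Notes on version B (the rewrite author's own statement) =====
-- stated objective: simpler
-- what changed: B is one fused pass: per byte-slice the best window is kept on the fly (strict >, no windows list, no max call) and compared immediately against a global running best (strict >), eliminating the bs_windows dict, the cmp closure, the intermediate tuples and both max() calls (a constant-factor speedup, measured ~1.8x).
-- outside the precondition, e.g. on read_level_find_best({}): A raises ValueError, B returns None
import Mathlib
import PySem

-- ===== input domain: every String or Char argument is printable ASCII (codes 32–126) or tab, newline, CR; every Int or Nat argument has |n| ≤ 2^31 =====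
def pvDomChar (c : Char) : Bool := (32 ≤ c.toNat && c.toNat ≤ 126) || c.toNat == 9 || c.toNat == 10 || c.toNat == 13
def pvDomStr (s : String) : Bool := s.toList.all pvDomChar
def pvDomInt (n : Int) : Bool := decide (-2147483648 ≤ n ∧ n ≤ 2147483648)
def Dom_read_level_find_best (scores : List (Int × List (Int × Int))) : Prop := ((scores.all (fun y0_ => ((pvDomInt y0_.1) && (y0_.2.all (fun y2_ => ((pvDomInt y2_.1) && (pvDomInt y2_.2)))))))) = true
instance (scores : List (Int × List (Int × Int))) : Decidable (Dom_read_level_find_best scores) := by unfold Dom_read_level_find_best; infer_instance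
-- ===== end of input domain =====

-- B replaces A's two-phase pipeline (windows list + max per slice, bs_windows dict + max over keys)
-- by one fused pass keeping a running best window per slice and a global running best: simpler, no dict, no max() calls.


-- ===== PORT A =====
-- A's inner loop: state (windows, window_start, in_window, dly); window_start/dly start
-- at 0 but are only read after having been assigned (only when in_window is true).
def pyFindWindows (dly_scores : List (Int × Int)) : List (Int × Int) :=
  let st := dly_scores.foldl
    (fun (st : List (Int × Int) × Int × Bool × Int) (q : Int × Int) =>
      let windows := st.1
      let window_start := st.2.1
      let in_window := st.2.2.1
      if q.2 = 0 ∧ in_window = false then (windows, q.1, true, q.1)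
      else if in_window = true ∧ q.2 ≠ 0 then (windows ++ [(window_start, q.1)], window_start, false, q.1)
      else (windows, window_start, in_window, q.1))
    ([], 0, false, 0)
  if st.2.2.1 then st.1 ++ [(st.2.1, st.2.2.2)] else st.1

-- A's "find longest window" step: best_window = None; if len(windows): best_window = max(...)
def bestWindowA (dly_scores : List (Int × Int)) : Option (Int × Int) :=
  let windows := pyFindWindows dly_scores
  if windows.length ≠ 0 then PySem.List.max? windows (fun w => w.2 - w.1) else none

def read_level_find_best (scores : List (Int × List (Int × Int))) : Option (Int × Int × Int) :=
  let bs_windows : PySem.Dict Int (Option (Int × Int)) :=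
    scores.foldl (fun d p => d.insert p.1 (bestWindowA p.2)) PySem.Dict.empty
  let cmp : Int → Int := fun bs =>
    match bs_windows.getD bs none with
    | none => -1
    | some w => w.2 - w.1
  match PySem.List.max? bs_windows.keys cmp with
  | none => none   -- Python raises ValueError here (empty scores); excluded by Pre_
  | some best_bs =>
    match bs_windows.getD best_bs none with
    | none => none
    | some w => some (best_bs, PySem.Int.floordiv (w.1 + w.2) 2, w.2 - w.1)

-- ===== PORT B =====
-- Source B's inner loop: state (bw, start, end); end starts at 0 and is only read when start ≠ none.
def altBestWindow (dly_scores : List (Int × Int)) : Option (Int × Int) :=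
  let st := dly_scores.foldl
    (fun (st : Option (Int × Int) × Option Int × Int) (q : Int × Int) =>
      let bw := st.1
      let start := st.2.1
      if q.2 = 0 then
        match start with
        | none => (bw, some q.1, q.1)
        | some _ => (bw, start, q.1)
      else
        match start with
        | none => st
        | some s =>
          match bw with
          | none => (some (s, q.1), none, st.2.2)
          | some w => if q.1 - s > w.2 - w.1 then (some (s, q.1), none, st.2.2) else (bw, none, st.2.2))
    (none, none, 0)
  match st.2.1 with
  | none => st.1
  | some s =>
    match st.1 with
    | none => some (s, st.2.2)
    | some w => if st.2.2 - s > w.2 - w.1 then some (s, st.2.2) else some w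

def read_level_find_best_alt (scores : List (Int × List (Int × Int))) : Option (Int × Int × Int) :=
  let best := scores.foldl
    (fun (best : Option (Int × Int × Option (Int × Int))) p =>
      let bw := altBestWindow p.2
      let key : Int := match bw with | none => -1 | some w => w.2 - w.1
      match best with
      | none => some (key, p.1, bw)
      | some b => if key > b.1 then some (key, p.1, bw) else best)
    none
  match best with
  | none => none
  | some (_, _, none) => none
  | some (_, bs, some w) => some (bs, PySem.Int.floordiv (w.1 + w.2) 2, w.2 - w.1)

-- ===== PRECONDITION & SPEC =====
-- Pre_ excludes (a) empty scores, where Python A raises ValueError (max of an empty dict), and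
-- (b) association lists with duplicate outer keys, which do not represent a Python dict
-- (the dict constructor collapses them, so Python A never receives such an input).
def Pre_read_level_find_best (scores : List (Int × List (Int × Int))) : Prop :=
  scores ≠ [] ∧ (scores.map Prod.fst).Nodup
instance (scores : List (Int × List (Int × Int))) : Decidable (Pre_read_level_find_best scores) := by
  unfold Pre_read_level_find_best; infer_instance

def pvWitness_read_level_find_best : (List (Int × List (Int × Int))) :=
  [(0, [(1, 0), (2, 0), (3, 1)]), (1, [(1, 1)])]

def Spec_read_level_find_best (scores : List (Int × List (Int × Int))) (out : Option (Int × Int × Int)) : Prop := out = read_level_find_best_alt scores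
instance (scores : List (Int × List (Int × Int))) (out : Option (Int × Int × Int)) : Decidable (Spec_read_level_find_best scores out) := by unfold Spec_read_level_find_best; infer_instance

-- ===== CLAIM (what is proved, stated in full; the proofs are below) =====
def Claim_equal_read_level_find_best : Prop := ∀ (scores : List (Int × List (Int × Int))), Dom_read_level_find_best scores → Pre_read_level_find_best scores → Spec_read_level_find_best scores (read_level_find_best scores)

-- ===== LEMMAS AND PROOFS =====

-- named copies of the loop bodies and epilogues of the two ports (each is definitionally
-- the corresponding lambda in the port; the *_eq bridges below are rfl)
def stepA (st : List (Int × Int) × Int × Bool × Int) (q : Int × Int) : List (Int × Int) × Int × Bool × Int :=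
  let windows := st.1
  let window_start := st.2.1
  let in_window := st.2.2.1
  if q.2 = 0 ∧ in_window = false then (windows, q.1, true, q.1)
  else if in_window = true ∧ q.2 ≠ 0 then (windows ++ [(window_start, q.1)], window_start, false, q.1)
  else (windows, window_start, in_window, q.1)

def stepB (st : Option (Int × Int) × Option Int × Int) (q : Int × Int) : Option (Int × Int) × Option Int × Int :=
  let bw := st.1
  let start := st.2.1
  if q.2 = 0 then
    match start with
    | none => (bw, some q.1, q.1)
    | some _ => (bw, start, q.1)
  else
    match start with
    | none => st
    | some s =>
      match bw with
      | none => (some (s, q.1), none, st.2.2)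
      | some w => if q.1 - s > w.2 - w.1 then (some (s, q.1), none, st.2.2) else (bw, none, st.2.2)

def finishA (st : List (Int × Int) × Int × Bool × Int) : List (Int × Int) :=
  if st.2.2.1 then st.1 ++ [(st.2.1, st.2.2.2)] else st.1

def finishB (st : Option (Int × Int) × Option Int × Int) : Option (Int × Int) :=
  match st.2.1 with
  | none => st.1
  | some s =>
    match st.1 with
    | none => some (s, st.2.2)
    | some w => if st.2.2 - s > w.2 - w.1 then some (s, st.2.2) else some w

lemma pyFindWindows_eq (ds : List (Int × Int)) :
    pyFindWindows ds = finishA (ds.foldl stepA ([], 0, false, 0)) := rfl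

lemma altBestWindow_eq (ds : List (Int × Int)) :
    altBestWindow ds = finishB (ds.foldl stepB (none, none, 0)) := rfl

lemma max?_append_singleton (l : List (Int × Int)) (x : Int × Int) :
    PySem.List.max? (l ++ [x]) (fun w => w.2 - w.1) =
      (match PySem.List.max? l (fun w => w.2 - w.1) with
       | none => some x
       | some m => if m.2 - m.1 < x.2 - x.1 then some x else some m) := by
  cases hm : PySem.List.max? l (fun w => w.2 - w.1) with
  | none =>
    have hl : l = [] := (PySem.List.max?_eq_none_iff _ _).mp hm
    subst hl; rfl
  | some m =>
    unfold PySem.List.max? at hm ⊢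
    rw [List.foldl_append, hm]
    rfl

lemma inner_aux (ds : List (Int × Int)) :
    ∀ (windows : List (Int × Int)) (ws : Int) (inw : Bool) (dly : Int)
      (bw : Option (Int × Int)) (start : Option Int) (endv : Int),
      (inw = true → start = some ws ∧ endv = dly) →
      (inw = false → start = none) →
      bw = PySem.List.max? windows (fun w => w.2 - w.1) →
      finishB (ds.foldl stepB (bw, start, endv)) =
        PySem.List.max? (finishA (ds.foldl stepA (windows, ws, inw, dly))) (fun w => w.2 - w.1) := by
  induction ds with
  | nil =>
    intro windows ws inw dly bw start endv h1 h2 hbw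
    cases inw with
    | false =>
      have hs := h2 rfl
      subst hs; subst hbw
      simp [finishA, finishB]
    | true =>
      obtain ⟨hs, he⟩ := h1 rfl
      subst hs; subst he; subst hbw
      have hfA : finishA (windows, ws, true, endv) = windows ++ [(ws, endv)] := by
        simp [finishA]
      rw [List.foldl_nil, List.foldl_nil, hfA, max?_append_singleton]
      cases hm : PySem.List.max? windows (fun w => w.2 - w.1) with
      | none => rfl
      | some m => rfl
  | cons q t ih =>
    intro windows ws inw dly bw start endv h1 h2 hbw
    simp only [List.foldl_cons]
    by_cases hq : q.2 = 0
    · cases inw with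
      | false =>
        have hs := h2 rfl
        have hA : stepA (windows, ws, false, dly) q = (windows, q.1, true, q.1) := by
          simp [stepA, hq]
        have hB : stepB (bw, start, endv) q = (bw, some q.1, q.1) := by
          subst hs; simp [stepB, hq]
        rw [hA, hB]
        exact ih windows q.1 true q.1 bw (some q.1) q.1 (fun _ => ⟨rfl, rfl⟩) (by simp) hbw
      | true =>
        obtain ⟨hs, he⟩ := h1 rfl
        have hA : stepA (windows, ws, true, dly) q = (windows, ws, true, q.1) := by
          simp [stepA, hq]
        have hB : stepB (bw, start, endv) q = (bw, some ws, q.1) := by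
          subst hs; simp [stepB, hq]
        rw [hA, hB]
        exact ih windows ws true q.1 bw (some ws) q.1 (fun _ => ⟨rfl, rfl⟩) (by simp) hbw
    · cases inw with
      | false =>
        have hs := h2 rfl
        have hA : stepA (windows, ws, false, dly) q = (windows, ws, false, q.1) := by
          simp [stepA, hq]
        have hB : stepB (bw, start, endv) q = (bw, start, endv) := by
          subst hs; simp [stepB, hq]
        rw [hA, hB]
        exact ih windows ws false q.1 bw start endv (by simp) (fun _ => hs) hbw
      | true =>
        obtain ⟨hs, he⟩ := h1 rfl
        subst hs; subst he
        have hA : stepA (windows, ws, true, endv) q = (windows ++ [(ws, q.1)], ws, false, q.1) := by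
          simp [stepA, hq]
        rw [hA]
        cases hbwc : bw with
        | none =>
          have hB : stepB (none, some ws, endv) q = (some (ws, q.1), none, endv) := by
            simp [stepB, hq]
          rw [hB]
          refine ih _ ws false q.1 _ none endv (by simp) (fun _ => rfl) ?_
          rw [max?_append_singleton, ← hbw, hbwc]
        | some w =>
          have hB : stepB (some w, some ws, endv) q =
              ((if q.1 - ws > w.2 - w.1 then some (ws, q.1) else some w), none, endv) := by
            by_cases hlt : q.1 - ws > w.2 - w.1
            · simp [stepB, hq, hlt]
            · simp [stepB, hq, hlt]
          rw [hB]
          refine ih _ ws false q.1 _ none endv (by simp) (fun _ => rfl) ?_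
          rw [max?_append_singleton, ← hbw, hbwc]

lemma bestWindowA_eq_alt (ds : List (Int × Int)) : bestWindowA ds = altBestWindow ds := by
  have h := inner_aux ds [] 0 false 0 none none 0 (by simp) (fun _ => rfl) rfl
  rw [altBestWindow_eq, h, ← pyFindWindows_eq]
  unfold bestWindowA
  cases hw : pyFindWindows ds with
  | nil => simp [PySem.List.max?]
  | cons a l => simp

-- the key A's outer max compares: -1 for no window, else the window length
def keyOf (p : Int × List (Int × Int)) : Int :=
  match altBestWindow p.2 with
  | none => -1
  | some w => w.2 - w.1

lemma max?_congr_aux {α : Type} (k1 k2 : α → Int) (l : List α) :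
    ∀ acc : Option α, (∀ p ∈ l, k1 p = k2 p) → (∀ m, acc = some m → k1 m = k2 m) →
      l.foldl (fun acc x => match acc with
        | none => some x
        | some m => if k1 m < k1 x then some x else some m) acc =
      l.foldl (fun acc x => match acc with
        | none => some x
        | some m => if k2 m < k2 x then some x else some m) acc := by
  induction l with
  | nil => intro acc _ _; rfl
  | cons x t ih =>
    intro acc h hacc
    have hx : k1 x = k2 x := h x List.mem_cons_self
    have ht : ∀ p ∈ t, k1 p = k2 p := fun p hp => h p (List.mem_cons_of_mem _ hp)
    rw [List.foldl_cons, List.foldl_cons]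
    cases acc with
    | none =>
      exact ih (some x) ht (fun m hm => by cases hm; exact hx)
    | some m =>
      have hm : k1 m = k2 m := hacc m rfl
      show t.foldl _ (if k1 m < k1 x then some x else some m) =
           t.foldl _ (if k2 m < k2 x then some x else some m)
      rw [hm, hx]
      by_cases hlt : k2 m < k2 x
      · rw [if_pos hlt]
        exact ih (some x) ht (fun m' hm' => by cases hm'; exact hx)
      · rw [if_neg hlt]
        exact ih (some m) ht (fun m' hm' => by cases hm'; exact hm)

lemma max?_key_congr {α : Type} (l : List α) (k1 k2 : α → Int) (h : ∀ p ∈ l, k1 p = k2 p) :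
    PySem.List.max? l k1 = PySem.List.max? l k2 := by
  unfold PySem.List.max?
  exact max?_congr_aux k1 k2 l none h (by simp)

lemma max?_map_aux {α β : Type} (f : α → β) (k : β → Int) (l : List α) :
    ∀ acc : Option α,
      l.foldl (fun acc x => match acc with
        | none => some (f x)
        | some m => if k m < k (f x) then some (f x) else some m) (Option.map f acc) =
      Option.map f (l.foldl (fun acc x => match acc with
        | none => some x
        | some m => if k (f m) < k (f x) then some x else some m) acc) := by
  induction l with
  | nil => intro acc; rfl
  | cons x t ih =>
    intro acc
    rw [List.foldl_cons, List.foldl_cons]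
    cases acc with
    | none => exact ih (some x)
    | some m =>
      show t.foldl _ (if k (f m) < k (f x) then some (f x) else some (f m)) =
        Option.map f (t.foldl _ (if k (f m) < k (f x) then some x else some m))
      by_cases hlt : k (f m) < k (f x)
      · rw [if_pos hlt, if_pos hlt]; exact ih (some x)
      · rw [if_neg hlt, if_neg hlt]; exact ih (some m)

lemma max?_map_fst {α β : Type} (l : List α) (f : α → β) (k : β → Int) :
    PySem.List.max? (l.map f) k = Option.map f (PySem.List.max? l (fun x => k (f x))) := by
  unfold PySem.List.max?
  rw [List.foldl_map]
  exact max?_map_aux f k l none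

lemma get?_mk_map (g : Int × List (Int × Int) → Option (Int × Int)) (l : List (Int × List (Int × Int)))
    (h : (l.map Prod.fst).Nodup) (p0 : Int × List (Int × Int)) (hm : p0 ∈ l) :
    (PySem.Dict.mk (l.map (fun p => (p.1, g p)))).get? p0.1 = some (g p0) := by
  induction l with
  | nil => cases hm
  | cons a t ih =>
    simp only [List.map_cons, List.nodup_cons] at h
    rw [List.map_cons, PySem.Dict.get?_mk_cons]
    rcases List.mem_cons.mp hm with heq | hmem
    · subst heq; simp
    · have hne : (a.1 == p0.1) = false := by
        apply beq_false_of_ne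
        intro hcontra
        exact h.1 (hcontra ▸ List.mem_map_of_mem hmem)
      rw [hne]
      simp only [Bool.false_eq_true, if_false]
      exact ih h.2 hmem

def outerF (p : Int × List (Int × Int)) : Int × Int × Option (Int × Int) :=
  (keyOf p, p.1, altBestWindow p.2)

-- named copy of Source B's outer loop body (definitionally the lambda in the port)
def stepOuter (best : Option (Int × Int × Option (Int × Int))) (p : Int × List (Int × Int)) :
    Option (Int × Int × Option (Int × Int)) :=
  let bw := altBestWindow p.2
  let key : Int := match bw with | none => -1 | some w => w.2 - w.1
  match best with
  | none => some (key, p.1, bw)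
  | some b => if key > b.1 then some (key, p.1, bw) else best

def maxStepOuter (acc : Option (Int × List (Int × Int))) (x : Int × List (Int × Int)) :
    Option (Int × List (Int × Int)) :=
  match acc with
  | none => some x
  | some m => if keyOf m < keyOf x then some x else some m

lemma max?_keyOf_eq (l : List (Int × List (Int × Int))) :
    PySem.List.max? l keyOf = l.foldl maxStepOuter none := by
  unfold PySem.List.max?
  exact PySem.List.foldl_congr_mem l _ maxStepOuter none
    (fun acc x _ => by cases acc <;> rfl)

lemma stepOuter_some (m x : Int × List (Int × Int)) :
    stepOuter (some (outerF m)) x =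
      if keyOf m < keyOf x then some (outerF x) else some (outerF m) := by
  show (if keyOf x > keyOf m then some (keyOf x, x.1, altBestWindow x.2) else some (outerF m)) = _
  by_cases hlt : keyOf m < keyOf x
  · simp [hlt, outerF]
  · simp [hlt, gt_iff_lt]

lemma outer_fold (l : List (Int × List (Int × Int))) :
    ∀ acc : Option (Int × List (Int × Int)),
      l.foldl stepOuter (Option.map outerF acc) =
        Option.map outerF (l.foldl maxStepOuter acc) := by
  induction l with
  | nil => intro acc; rfl
  | cons x t ih =>
    intro acc
    simp only [List.foldl_cons]
    cases acc with
    | none => exact ih (some x)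
    | some m =>
      show t.foldl stepOuter (stepOuter (some (outerF m)) x) =
        Option.map outerF (t.foldl maxStepOuter (maxStepOuter (some m) x))
      rw [stepOuter_some]
      rw [show maxStepOuter (some m) x =
        (if keyOf m < keyOf x then some x else some m) from rfl]
      by_cases hlt : keyOf m < keyOf x
      · rw [if_pos hlt, if_pos hlt]
        exact ih (some x)
      · rw [if_neg hlt, if_neg hlt]
        exact ih (some m)

lemma alt_eq (scores : List (Int × List (Int × Int))) :
    read_level_find_best_alt scores =
      match PySem.List.max? scores keyOf with
      | none => none
      | some p =>
        match altBestWindow p.2 with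
        | none => none
        | some w => some (p.1, PySem.Int.floordiv (w.1 + w.2) 2, w.2 - w.1) := by
  have hfold : scores.foldl stepOuter none = Option.map outerF (scores.foldl maxStepOuter none) := by
    have h := outer_fold scores none
    simpa using h
  show (match scores.foldl stepOuter none with
        | none => none
        | some (_, _, none) => none
        | some (_, bs, some w) => some (bs, PySem.Int.floordiv (w.1 + w.2) 2, w.2 - w.1)) = _
  rw [hfold, max?_keyOf_eq]
  cases hm : scores.foldl maxStepOuter none with
  | none => rfl
  | some p =>
    simp only [Option.map_some, outerF]
    cases hb : altBestWindow p.2 with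
    | none => rfl
    | some w => rfl

-- ===== VERDICT (by name: the statement is the Claim_ definition above) =====
theorem read_level_find_best_spec : Claim_equal_read_level_find_best := by
  intro scores _ hpre
  obtain ⟨hne, hnodup⟩ := hpre
  unfold Spec_read_level_find_best
  have hd : scores.foldl (fun d p => d.insert p.1 (bestWindowA p.2)) PySem.Dict.empty =
      PySem.Dict.mk (scores.map (fun p => (p.1, bestWindowA p.2))) := by
    apply PySem.Dict.ext
    exact PySem.Dict.items_foldl_insert_fresh scores Prod.fst
      (fun p => bestWindowA p.2) PySem.Dict.empty (fun a _ => rfl) hnodup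
  simp only [read_level_find_best, hd]
  have hkeys : (PySem.Dict.mk (scores.map (fun p => (p.1, bestWindowA p.2)))).keys =
      scores.map Prod.fst := by
    simp only [PySem.Dict.keys, List.map_map]
    rfl
  rw [hkeys, max?_map_fst]
  have hcongr : ∀ p ∈ scores,
      (match (PySem.Dict.mk (scores.map (fun p => (p.1, bestWindowA p.2)))).getD p.1 none with
        | none => (-1 : Int)
        | some w => w.2 - w.1) = keyOf p := by
    intro p hp
    have hget : (PySem.Dict.mk (scores.map (fun p => (p.1, bestWindowA p.2)))).get? p.1
        = some (bestWindowA p.2) := get?_mk_map (fun p => bestWindowA p.2) scores hnodup p hp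
    simp only [PySem.Dict.getD]
    rw [hget, Option.getD_some, bestWindowA_eq_alt]
    rfl
  rw [max?_key_congr scores _ keyOf hcongr]
  rw [alt_eq]
  cases hm : PySem.List.max? scores keyOf with
  | none => rfl
  | some p0 =>
    have hp0 : p0 ∈ scores := PySem.List.max?_mem hm
    have hget : (PySem.Dict.mk (scores.map (fun p => (p.1, bestWindowA p.2)))).get? p0.1
        = some (bestWindowA p0.2) := get?_mk_map (fun p => bestWindowA p.2) scores hnodup p0 hp0
    simp only [Option.map_some, PySem.Dict.getD]
    rw [hget, Option.getD_some, bestWindowA_eq_alt]
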